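-- pv_equiv track=rewrite | github.com/RobertoGalluccioTest/adk-web-project | agents/pdf_parameter_agent/tools.py | combine_and_match
-- ===== SOURCE A (Python) =====
-- import itertools
--
-- def combine_and_match(param_rows: list[dict],
--                       table1_rows: list[dict],
--                       table2_rows: list[dict],
--                       key: str | None = None):
--     """
--     Deterministically merge:
--     - Identify a join key:
--         1) If key provided and present in param_rows columns -> use it.
--         2) Else use the first common column name shared by param_rows
--         and table1_rows or table2_rows.
--         3) Else fallback to the first column of param_rows.
--     - Build merged rows: param + best match from t1 + best match from t2.
--       Columns from t1 prefixed as 't1_' and from t2 as 't2_' to avoid collisions.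
--     Returns: list[dict]
--     """
--     def cols(rows):
--         return set(itertools.chain.from_iterable(r.keys() for r in rows)) if rows else set()
--
--     param_cols = cols(param_rows)
--     t1_cols = cols(table1_rows)
--     t2_cols = cols(table2_rows)
--
--     join_key = None
--     if key and key in param_cols:
--         join_key = key
--     else:
--         common = (param_cols & t1_cols) or (param_cols & t2_cols)
--         if common:
--             join_key = sorted(common)[0]
--         elif param_cols:
--             join_key = sorted(param_cols)[0]
--
--     # Index tables by join_key for quick lookup (exact match)
--     def index_by(rows, k):
--         idx = {}
--         for r in rows:
--             v = r.get(k)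
--             idx.setdefault(v, []).append(r)
--         return idx
--
--     t1_idx = index_by(table1_rows, join_key) if join_key else {}
--     t2_idx = index_by(table2_rows, join_key) if join_key else {}
--
--     merged = []
--     for prow in param_rows:
--         keyval = prow.get(join_key) if join_key else None
--         t1_matches = t1_idx.get(keyval, [None])
--         t2_matches = t2_idx.get(keyval, [None])
--
--         # take cartesian product so we don't lose multi-matches
--         for m1 in (t1_matches or [None]):
--             for m2 in (t2_matches or [None]):
--                 rec = dict(prow)  # base
--                 if m1:
--                     for k, v in m1.items():
--                         rec[f"t1_{k}"] = v
--                 if m2: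
--                     for k, v in m2.items():
--                         rec[f"t2_{k}"] = v
--                 merged.append(rec)
--
--     return merged
-- ===== SOURCE B (Python) =====
-- def combine_and_match(param_rows: list[dict],
--                       table1_rows: list[dict],
--                       table2_rows: list[dict],
--                       key: str | None = None):
--     # Same key selection as the original; the index_by pre-pass is replaced by
--     # direct per-row scans of the two tables.
--     def cols(rows):
--         c = set()
--         for r in rows:
--             c |= r.keys()
--         return c
--
--     param_cols = cols(param_rows)
--     t1_cols = cols(table1_rows)
--     t2_cols = cols(table2_rows)
--
--     join_key = None
--     if key and key in param_cols:
--         join_key = key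
--     else:
--         common = (param_cols & t1_cols) or (param_cols & t2_cols)
--         if common:
--             join_key = sorted(common)[0]
--         elif param_cols:
--             join_key = sorted(param_cols)[0]
--
--     merged = []
--     for prow in param_rows:
--         if join_key:
--             keyval = prow.get(join_key)
--             t1_matches = [r for r in table1_rows if r.get(join_key) == keyval]
--             t2_matches = [r for r in table2_rows if r.get(join_key) == keyval]
--         else:
--             t1_matches, t2_matches = [], []
--         for m1 in (t1_matches or [None]):
--             for m2 in (t2_matches or [None]):
--                 rec = dict(prow)
--                 if m1:
--                     rec.update(("t1_" + k, v) for k, v in m1.items())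
--                 if m2:
--                     rec.update(("t2_" + k, v) for k, v in m2.items())
--                 merged.append(rec)
--     return merged
-- ===== Notes on version B (the rewrite author's own statement) =====
-- stated objective: simpler
-- what changed: The index_by pre-pass that builds a hash index per table is removed; each param row obtains its table matches by a direct filtering scan of the two tables, keeping the identical key-selection logic and cartesian-product merge.
import Mathlib
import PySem

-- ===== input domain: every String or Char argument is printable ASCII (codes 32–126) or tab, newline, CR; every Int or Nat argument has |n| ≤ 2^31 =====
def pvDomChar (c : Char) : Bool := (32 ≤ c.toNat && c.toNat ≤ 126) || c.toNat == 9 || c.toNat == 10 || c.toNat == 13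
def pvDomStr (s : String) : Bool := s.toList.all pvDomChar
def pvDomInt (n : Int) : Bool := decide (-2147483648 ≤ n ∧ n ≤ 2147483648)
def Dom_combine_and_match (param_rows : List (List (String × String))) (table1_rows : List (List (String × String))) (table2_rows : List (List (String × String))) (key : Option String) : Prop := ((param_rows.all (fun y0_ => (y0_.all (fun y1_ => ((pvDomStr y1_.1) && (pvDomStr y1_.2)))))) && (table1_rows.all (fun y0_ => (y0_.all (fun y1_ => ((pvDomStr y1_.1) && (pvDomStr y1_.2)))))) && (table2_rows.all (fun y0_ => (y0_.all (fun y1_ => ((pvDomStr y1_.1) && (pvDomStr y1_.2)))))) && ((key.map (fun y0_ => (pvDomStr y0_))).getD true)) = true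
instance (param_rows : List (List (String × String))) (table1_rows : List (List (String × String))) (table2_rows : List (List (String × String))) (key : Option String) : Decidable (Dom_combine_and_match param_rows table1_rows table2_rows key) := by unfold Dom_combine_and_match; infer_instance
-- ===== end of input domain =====

-- B removes A's index_by pre-pass: matches come from a direct filtering scan of each table
-- per param row; the key-selection logic and the cartesian-product merge are unchanged.
-- Simpler, not claimed faster.

-- ===== PORT A =====

-- Python truthiness of the Optional[str] values `key` / `join_key` (None and "" falsy)
def pvTruthy (o : Option String) : Bool :=
  match o with
  | none => false
  | some s => !(s == "")

-- r.get(k) on a row-dict (rows are Python dicts, held as their item lists)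
def pvRowGet (r : List (String × String)) (k : String) : Option String :=
  (PySem.Dict.ofList r).get? k

-- cols(rows) = set of all keys occurring in rows
def pvColsA (rows : List (List (String × String))) : PySem.Set String :=
  if rows.isEmpty then PySem.Set.empty
  else PySem.Set.ofList (rows.flatMap (fun r => (PySem.Dict.ofList r).keys))

-- the shared join-key selection (identical in A and B's Python)
def pvJoinKey (param_cols t1_cols t2_cols : PySem.Set String) (key : Option String) :
    Option String :=
  if pvTruthy key && PySem.Set.contains param_cols (key.getD "") then key
  else
    let c1 := PySem.Set.inter param_cols t1_cols
    let common := if c1.isEmpty then PySem.Set.inter param_cols t2_cols else c1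
    if !common.isEmpty then
      PySem.List.pyGet? (PySem.List.sorted common (fun x => x)) 0
    else if !param_cols.isEmpty then
      PySem.List.pyGet? (PySem.List.sorted param_cols (fun x => x)) 0
    else none

-- index_by(rows, k): idx.setdefault(r.get(k), []).append(r)
def pvIndexBy (rows : List (List (String × String))) (k : String) :
    PySem.Dict (Option String) (List (List (String × String))) :=
  rows.foldl (fun idx r => idx.modify (pvRowGet r k) [] (· ++ [r])) PySem.Dict.empty

-- rec[f"t1_{k}"] = v for k, v in m.items()  (pfx = "t1_" or "t2_")
def pvAddPrefixed (rec : PySem.Dict String String) (pfx : String)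
    (m : List (String × String)) : PySem.Dict String String :=
  (PySem.Dict.ofList m).items.foldl (fun d p => d.insert (pfx ++ p.1) p.2) rec

def combine_and_match (param_rows : List (List (String × String))) (table1_rows : List (List (String × String))) (table2_rows : List (List (String × String))) (key : Option String) : List (List (String × String)) :=
  let param_cols := pvColsA param_rows
  let join_key := pvJoinKey param_cols (pvColsA table1_rows) (pvColsA table2_rows) key
  let t1_idx := if pvTruthy join_key then pvIndexBy table1_rows (join_key.getD "") else PySem.Dict.empty
  let t2_idx := if pvTruthy join_key then pvIndexBy table2_rows (join_key.getD "") else PySem.Dict.empty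
  param_rows.foldl (fun merged prow =>
    let keyval : Option String :=
      if pvTruthy join_key then pvRowGet prow (join_key.getD "") else none
    -- t1_idx.get(keyval, [None]): rows are wrapped in `some` so the default [None] types
    let t1_matches : List (Option (List (String × String))) :=
      match t1_idx.get? keyval with
      | some l => l.map some
      | none => [none]
    let t2_matches : List (Option (List (String × String))) :=
      match t2_idx.get? keyval with
      | some l => l.map some
      | none => [none]
    let iter1 := if t1_matches.isEmpty then [none] else t1_matches   -- (t1_matches or [None])
    let iter2 := if t2_matches.isEmpty then [none] else t2_matches
    iter1.foldl (fun merged m1 =>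
      iter2.foldl (fun merged m2 =>
        let rec0 := PySem.Dict.ofList prow
        let rec1 := match m1 with
          | some r => if r.isEmpty then rec0 else pvAddPrefixed rec0 "t1_" r   -- `if m1:`
          | none => rec0
        let rec2 := match m2 with
          | some r => if r.isEmpty then rec1 else pvAddPrefixed rec1 "t2_" r   -- `if m2:`
          | none => rec1
        merged ++ [rec2.items]) merged) merged) []

-- ===== PORT B =====

-- B's cols: start from set() and fold `c |= r.keys()` over the rows
def pvColsB (rows : List (List (String × String))) : PySem.Set String :=
  rows.foldl (fun c r => PySem.Set.union c (PySem.Dict.ofList r).keys) PySem.Set.empty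

def combine_and_match_alt (param_rows : List (List (String × String))) (table1_rows : List (List (String × String))) (table2_rows : List (List (String × String))) (key : Option String) : List (List (String × String)) :=
  let param_cols := pvColsB param_rows
  let join_key := pvJoinKey param_cols (pvColsB table1_rows) (pvColsB table2_rows) key
  param_rows.foldl (fun merged prow =>
    let ms : List (List (String × String)) × List (List (String × String)) :=
      if pvTruthy join_key then
        let jk := join_key.getD ""
        let keyval := pvRowGet prow jk
        (table1_rows.filter (fun r => pvRowGet r jk == keyval),
         table2_rows.filter (fun r => pvRowGet r jk == keyval))
      else ([], [])
    let iter1 := if ms.1.isEmpty then [none] else ms.1.map some   -- (t1_matches or [None])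
    let iter2 := if ms.2.isEmpty then [none] else ms.2.map some
    iter1.foldl (fun merged m1 =>
      iter2.foldl (fun merged m2 =>
        let rec0 := PySem.Dict.ofList prow
        let rec1 := match m1 with
          | some r => if r.isEmpty then rec0 else pvAddPrefixed rec0 "t1_" r   -- `if m1:`
          | none => rec0
        let rec2 := match m2 with
          | some r => if r.isEmpty then rec1 else pvAddPrefixed rec1 "t2_" r   -- `if m2:`
          | none => rec1
        merged ++ [rec2.items]) merged) merged) []

-- ===== PRECONDITION & SPEC =====
def Spec_combine_and_match (param_rows : List (List (String × String))) (table1_rows : List (List (String × String))) (table2_rows : List (List (String × String))) (key : Option String) (out : List (List (String × String))) : Prop := out = combine_and_match_alt param_rows table1_rows table2_rows key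
instance (param_rows : List (List (String × String))) (table1_rows : List (List (String × String))) (table2_rows : List (List (String × String))) (key : Option String) (out : List (List (String × String))) : Decidable (Spec_combine_and_match param_rows table1_rows table2_rows key out) := by unfold Spec_combine_and_match; infer_instance

-- ===== CLAIM (what is proved, stated in full; the proofs are below) =====
def Claim_equal_combine_and_match : Prop := ∀ (param_rows : List (List (String × String))) (table1_rows : List (List (String × String))) (table2_rows : List (List (String × String))) (key : Option String), Dom_combine_and_match param_rows table1_rows table2_rows key → Spec_combine_and_match param_rows table1_rows table2_rows key (combine_and_match param_rows table1_rows table2_rows key)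

-- ===== LEMMAS AND PROOFS =====

-- The two ways of collecting the column set agree.
lemma pvCols_aux (rows : List (List (String × String))) :
    ∀ (c : PySem.Set String),
      rows.foldl (fun c r => PySem.Set.union c (PySem.Dict.ofList r).keys) c
        = PySem.Set.update c (rows.flatMap (fun r => (PySem.Dict.ofList r).keys)) := by
  induction rows with
  | nil => intro c; rfl
  | cons r rs ih =>
    intro c
    simp only [List.foldl_cons, List.flatMap_cons, ih]
    exact (List.foldl_append ..).symm

lemma pvCols_eq (rows : List (List (String × String))) : pvColsA rows = pvColsB rows := by
  cases rows with
  | nil => rfl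
  | cons r rs =>
    unfold pvColsA pvColsB
    rw [pvCols_aux]
    rfl

-- The lookup in A's index equals B's filter (nonempty case wrapped in `some`).
lemma pvIndexBy_get? (rows : List (List (String × String))) (k : String) (v : Option String) :
    (pvIndexBy rows k).get? v =
      (if (rows.filter (fun r => pvRowGet r k == v)).isEmpty then none
       else some (rows.filter (fun r => pvRowGet r k == v))) := by
  have hkeys : (pvIndexBy rows k).keys
      = PySem.Set.update ((PySem.Dict.empty : PySem.Dict (Option String) (List (List (String × String)))).keys) (rows.map (fun r => pvRowGet r k)) := by
    unfold pvIndexBy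
    exact PySem.Dict.keys_foldl_modify_key rows (fun r => pvRowGet r k) []
      (fun _ r => (· ++ [r])) PySem.Dict.empty
  have hmemkeys : ∀ x, x ∈ (pvIndexBy rows k).keys ↔ x ∈ rows.map (fun r => pvRowGet r k) := by
    intro x
    rw [hkeys, PySem.Dict.keys_empty]
    exact PySem.Set.mem_ofList _ _
  have hgetD : (pvIndexBy rows k).getD v [] = rows.filter (fun r => pvRowGet r k == v) := by
    unfold pvIndexBy
    rw [← List.foldl_map (f := fun r => (pvRowGet r k, r))
          (g := fun (d : PySem.Dict (Option String) (List (List (String × String)))) p =>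
            d.modify p.1 [] (· ++ [p.2])),
        PySem.Dict.getD_foldl_modify_append]
    simp [List.filter_map, Function.comp_def]
  rcases hg : (pvIndexBy rows k).get? v with _ | l
  · have hnv : v ∉ rows.map (fun r => pvRowGet r k) := by
      intro h
      exact (PySem.Dict.get?_eq_none_iff_not_mem_keys _ _).mp hg ((hmemkeys v).mpr h)
    have hfil : rows.filter (fun r => pvRowGet r k == v) = [] := by
      refine List.filter_eq_nil_iff.mpr ?_
      intro r hr hbeq
      exact hnv (List.mem_map.mpr ⟨r, hr, by simpa using hbeq⟩)
    simp [hfil]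
  · have hl : l = rows.filter (fun r => pvRowGet r k == v) := by
      have h := hgetD
      rw [PySem.Dict.getD_eq_get?_getD, hg] at h
      simpa using h
    have hne : rows.filter (fun r => pvRowGet r k == v) ≠ [] := by
      intro h0
      have hv : v ∈ (pvIndexBy rows k).keys := by
        by_contra hnv
        rw [← PySem.Dict.get?_eq_none_iff_not_mem_keys] at hnv
        simp [hg] at hnv
      obtain ⟨r, hr, hrk⟩ := List.mem_map.mp ((hmemkeys v).mp hv)
      have : r ∈ rows.filter (fun r => pvRowGet r k == v) :=
        List.mem_filter.mpr ⟨hr, by simp [hrk]⟩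
      simp [h0] at this
    simp [hl, List.isEmpty_iff, hne]

-- ===== VERDICT (by name: the statement is the Claim_ definition above) =====
theorem combine_and_match_spec : Claim_equal_combine_and_match := by
  intro param_rows table1_rows table2_rows key _hdom
  unfold Spec_combine_and_match
  unfold combine_and_match combine_and_match_alt
  simp only [pvCols_eq]
  congr 1
  funext merged prow
  cases hjk : pvTruthy (pvJoinKey (pvColsB param_rows) (pvColsB table1_rows)
      (pvColsB table2_rows) key) with
  | false =>
    simp [PySem.Dict.get?_empty]
  | true =>
    simp only [if_true]
    rw [pvIndexBy_get?, pvIndexBy_get?]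
    by_cases h1 : (table1_rows.filter (fun r =>
        pvRowGet r ((pvJoinKey (pvColsB param_rows) (pvColsB table1_rows) (pvColsB table2_rows) key).getD "")
          == pvRowGet prow ((pvJoinKey (pvColsB param_rows) (pvColsB table1_rows) (pvColsB table2_rows) key).getD ""))).isEmpty <;>
    by_cases h2 : (table2_rows.filter (fun r =>
        pvRowGet r ((pvJoinKey (pvColsB param_rows) (pvColsB table1_rows) (pvColsB table2_rows) key).getD "")
          == pvRowGet prow ((pvJoinKey (pvColsB param_rows) (pvColsB table1_rows) (pvColsB table2_rows) key).getD ""))).isEmpty <;>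
    simp [h1, h2]
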